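-- pv_equiv track=rewrite | github.com/lesliechangpm/SocialMediaAgent | src/platform_optimizer.py | _optimize_hashtags
-- ===== SOURCE A (Python) =====
-- from typing import Dict, List, Tuple
--
-- def _optimize_hashtags(hashtags: List[str], limit: int, optimal: int) -> List[str]:
--     """Optimize hashtag selection and count"""
--     if not hashtags:
--         return []
--
--     # Remove duplicates while preserving order
--     unique_hashtags = []
--     seen = set()
--     for tag in hashtags:
--         if tag.lower() not in seen:
--             unique_hashtags.append(tag)
--             seen.add(tag.lower())
--
--     # Prioritize most relevant hashtags (simplified)
--     priority_order = [
--         "#MortgageRates", "#HomeLoans", "#RealEstate", "#Refinancing",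
--         "#FirstTimeBuyer", "#Homeownership", "#MortgageExpert", "#HomeBuying"
--     ]
--
--     prioritized = []
--     remaining = []
--
--     for tag in unique_hashtags:
--         if tag in priority_order:
--             prioritized.append(tag)
--         else:
--             remaining.append(tag)
--
--     # Sort prioritized by priority order
--     prioritized.sort(key=lambda x: priority_order.index(x) if x in priority_order else len(priority_order))
--
--     # Combine and limit to optimal count
--     final_hashtags = (prioritized + remaining)[:min(optimal, limit)]
--
--     return final_hashtags
-- ===== SOURCE B (Python) =====
-- def _optimize_hashtags(hashtags, limit, optimal):
--     """Optimize hashtag selection and count"""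
--     if not hashtags:
--         return []
--
--     # Dedup case-insensitively, keeping the first occurrence, via one dict
--     first_by_lower = {}
--     for tag in hashtags:
--         first_by_lower.setdefault(tag.lower(), tag)
--     unique_hashtags = list(first_by_lower.values())
--
--     priority_order = [
--         "#MortgageRates", "#HomeLoans", "#RealEstate", "#Refinancing",
--         "#FirstTimeBuyer", "#Homeownership", "#MortgageExpert", "#HomeBuying"
--     ]
--
--     # Gather priority tags by scanning the fixed priority table (no split + sort)
--     prioritized = [p for p in priority_order if p in unique_hashtags]
--     remaining = [t for t in unique_hashtags if t not in priority_order]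
--
--     return (prioritized + remaining)[:min(optimal, limit)]
-- ===== Notes on version B (the rewrite author's own statement) =====
-- stated objective: simpler
-- what changed: Dedup becomes one dict.setdefault pass keyed by the lowercased tag, and the split-into-two-lists-then-sort-by-priority-index step is replaced by a single forward scan of the fixed priority table gathering present tags, so the sort disappears.
import Mathlib
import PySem

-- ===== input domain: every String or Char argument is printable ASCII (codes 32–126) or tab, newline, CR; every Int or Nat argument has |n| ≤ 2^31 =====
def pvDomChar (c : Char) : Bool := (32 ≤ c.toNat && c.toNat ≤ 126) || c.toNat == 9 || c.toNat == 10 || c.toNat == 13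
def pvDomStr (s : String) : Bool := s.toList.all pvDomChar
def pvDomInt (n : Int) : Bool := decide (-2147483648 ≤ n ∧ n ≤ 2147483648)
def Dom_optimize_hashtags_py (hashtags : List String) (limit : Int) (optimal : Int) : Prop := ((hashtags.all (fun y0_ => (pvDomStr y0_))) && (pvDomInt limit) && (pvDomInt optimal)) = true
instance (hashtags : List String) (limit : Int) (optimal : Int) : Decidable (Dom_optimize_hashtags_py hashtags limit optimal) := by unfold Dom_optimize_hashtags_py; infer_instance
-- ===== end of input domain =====

-- B replaces the split-then-sort-by-priority-index step by a forward scan of the fixed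
-- priority table (and deduplicates with one dict keyed by the lowercased tag): simpler, no sort.

-- the fixed priority table (a shared constant of both Pythons)
def priority_order : List String :=
  ["#MortgageRates", "#HomeLoans", "#RealEstate", "#Refinancing",
   "#FirstTimeBuyer", "#Homeownership", "#MortgageExpert", "#HomeBuying"]

-- ===== PORT A =====
-- A's sort key: priority_order.index(x) if x in priority_order else len(priority_order)
def pvPrioKey (x : String) : Nat :=
  if x ∈ priority_order then (PySem.List.index? priority_order x).getD priority_order.length
  else priority_order.length

def optimize_hashtags_py (hashtags : List String) (limit : Int) (optimal : Int) : List String :=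
  if hashtags = [] then []
  else
    -- dedup loop: unique_hashtags list + seen set of lowercased tags
    let ded := hashtags.foldl
      (fun (acc : List String × PySem.Set String) tag =>
        if PySem.Set.contains acc.2 (PySem.Str.lower tag) then acc
        else (acc.1 ++ [tag], PySem.Set.add acc.2 (PySem.Str.lower tag)))
      ([], PySem.Set.empty)
    -- partition loop into prioritized / remaining
    let parts := ded.1.foldl
      (fun (acc : List String × List String) tag =>
        if tag ∈ priority_order then (acc.1 ++ [tag], acc.2) else (acc.1, acc.2 ++ [tag]))
      ([], [])
    -- prioritized.sort(key=...)
    let prioritized := PySem.List.sorted parts.1 pvPrioKey false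
    PySem.List.slice (prioritized ++ parts.2) none (some (min optimal limit))

-- ===== PORT B =====
def optimize_hashtags_py_alt (hashtags : List String) (limit : Int) (optimal : Int) : List String :=
  if hashtags = [] then []
  else
    let d := hashtags.foldl
      (fun (d : PySem.Dict String String) tag => PySem.Dict.setdefault d (PySem.Str.lower tag) tag)
      PySem.Dict.empty
    let unique := d.values
    let prioritized := priority_order.filter (fun p => p ∈ unique)
    let remaining := unique.filter (fun t => ¬ t ∈ priority_order)
    PySem.List.slice (prioritized ++ remaining) none (some (min optimal limit))

-- ===== PRECONDITION & SPEC =====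
def Spec_optimize_hashtags_py (hashtags : List String) (limit : Int) (optimal : Int) (out : List String) : Prop := out = optimize_hashtags_py_alt hashtags limit optimal
instance (hashtags : List String) (limit : Int) (optimal : Int) (out : List String) : Decidable (Spec_optimize_hashtags_py hashtags limit optimal out) := by unfold Spec_optimize_hashtags_py; infer_instance

-- ===== CLAIM (what is proved, stated in full; the proofs are below) =====
def Claim_equal_optimize_hashtags_py : Prop := ∀ (hashtags : List String) (limit : Int) (optimal : Int), Dom_optimize_hashtags_py hashtags limit optimal → Spec_optimize_hashtags_py hashtags limit optimal (optimize_hashtags_py hashtags limit optimal)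

-- ===== LEMMAS AND PROOFS =====

-- Dict.contains is membership of the key list / Set.contains
theorem dict_contains_eq_set (d : PySem.Dict String String) (k : String) :
    d.contains k = PySem.Set.contains d.keys k := by
  simp [PySem.Dict.contains, PySem.Set.contains, PySem.Dict.keys, List.any_eq, List.mem_map]

theorem setdefault_items_new (d : PySem.Dict String String) (k v : String)
    (h : d.contains k = false) : (d.setdefault k v).items = d.items ++ [(k, v)] := by
  rw [PySem.Dict.setdefault_of_not_contains (h := h)]
  simp [PySem.Dict.insert, h]

theorem set_add_new (s : PySem.Set String) (x : String) (h : PySem.Set.contains s x = false) :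
    PySem.Set.add s x = s ++ [x] := by
  simp [PySem.Set.contains] at h; simp [PySem.Set.add, PySem.Set.contains, h]

theorem not_mem_keys_of_not_contains (d : PySem.Dict String String) (k : String)
    (h : d.contains k = false) : k ∉ d.keys := by
  rw [dict_contains_eq_set] at h
  simp [PySem.Set.contains] at h; exact h

-- The dedup loops agree: A's (list, seen-set) fold produces exactly the values of B's dict,
-- whose keys are the lowercased values.
theorem dedup_agree (l : List String) (d : PySem.Dict String String)
    (hkv : d.keys = d.values.map PySem.Str.lower) :
    (l.foldl
      (fun (acc : List String × PySem.Set String) tag =>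
        if PySem.Set.contains acc.2 (PySem.Str.lower tag) then acc
        else (acc.1 ++ [tag], PySem.Set.add acc.2 (PySem.Str.lower tag)))
      (d.values, d.keys)).1
    = (l.foldl
        (fun (d : PySem.Dict String String) tag =>
          PySem.Dict.setdefault d (PySem.Str.lower tag) tag) d).values := by
  induction l generalizing d with
  | nil => simp
  | cons tag l ih =>
      simp only [List.foldl_cons]
      rcases hc : d.contains (PySem.Str.lower tag) with _ | _
      · -- new key: both sides append
        rw [dict_contains_eq_set] at hc
        have hitems := setdefault_items_new d (PySem.Str.lower tag) tag
          (by rw [dict_contains_eq_set]; exact hc)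
        have hkeys : (d.setdefault (PySem.Str.lower tag) tag).keys
            = d.keys ++ [PySem.Str.lower tag] := by
          simp [PySem.Dict.keys, hitems]
        have hvals : (d.setdefault (PySem.Str.lower tag) tag).values
            = d.values ++ [tag] := by
          simp [PySem.Dict.values, hitems]
        rw [hc, if_neg (by simp), set_add_new _ _ hc]
        have hkv' : (d.setdefault (PySem.Str.lower tag) tag).keys
            = (d.setdefault (PySem.Str.lower tag) tag).values.map PySem.Str.lower := by
          rw [hkeys, hvals]; simp [hkv]
        have := ih (d.setdefault (PySem.Str.lower tag) tag) hkv'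
        rw [hkeys, hvals] at this
        exact this
      · -- seen key: both sides unchanged
        rw [dict_contains_eq_set] at hc
        rw [hc, if_pos rfl, PySem.Dict.setdefault_of_contains
          (h := by rw [dict_contains_eq_set]; exact hc)]
        exact ih d hkv

-- the values of B's dict are pairwise distinct (their lowercasings are the distinct keys)
theorem values_nodup (l : List String) (d : PySem.Dict String String)
    (hkv : d.keys = d.values.map PySem.Str.lower) (hnd : d.keys.Nodup) :
    (l.foldl
        (fun (d : PySem.Dict String String) tag =>
          PySem.Dict.setdefault d (PySem.Str.lower tag) tag) d).values.Nodup := by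
  induction l generalizing d with
  | nil =>
      rw [hkv] at hnd
      exact List.Nodup.of_map _ hnd
  | cons tag l ih =>
      simp only [List.foldl_cons]
      rcases hc : d.contains (PySem.Str.lower tag) with _ | _
      · have hitems := setdefault_items_new d (PySem.Str.lower tag) tag hc
        have hkeys : (d.setdefault (PySem.Str.lower tag) tag).keys
            = d.keys ++ [PySem.Str.lower tag] := by simp [PySem.Dict.keys, hitems]
        have hvals : (d.setdefault (PySem.Str.lower tag) tag).values
            = d.values ++ [tag] := by simp [PySem.Dict.values, hitems]
        apply ih
        · rw [hkeys, hvals]; simp [hkv]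
        · rw [hkeys]
          refine List.Nodup.append hnd (List.nodup_singleton _) ?_
          simp [not_mem_keys_of_not_contains d _ hc]
      · rw [PySem.Dict.setdefault_of_contains (h := hc)]
        exact ih d hkv hnd
-- A's partition loop is a pair of filters
theorem partition_filters (l : List String) (acc : List String × List String) :
    l.foldl
      (fun (acc : List String × List String) tag =>
        if tag ∈ priority_order then (acc.1 ++ [tag], acc.2) else (acc.1, acc.2 ++ [tag])) acc
    = (acc.1 ++ l.filter (fun t => decide (t ∈ priority_order)),
       acc.2 ++ l.filter (fun t => decide (¬ t ∈ priority_order))) := by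
  induction l generalizing acc with
  | nil => simp
  | cons x xs ih =>
      by_cases hx : x ∈ priority_order <;> simp [hx, ih]

-- sorting the priority tags by table index = scanning the table and gathering
theorem sort_eq_gather (u : List String) (hu : u.Nodup) :
    PySem.List.sorted (u.filter (fun t => decide (t ∈ priority_order))) pvPrioKey false
    = priority_order.filter (fun p => decide (p ∈ u)) := by
  apply PySem.List.sorted_eq_of_perm_of_pairwise_lt
  · apply (List.perm_ext_iff_of_nodup (List.Nodup.filter _ (by decide)) (List.Nodup.filter _ hu)).2
    intro a
    simp [and_comm]
  · have hpw : priority_order.Pairwise (fun a b => pvPrioKey a < pvPrioKey b) := by decide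
    exact List.Pairwise.sublist (List.filter_sublist (l := priority_order)) hpw

-- ===== VERDICT (by name: the statement is the Claim_ definition above) =====
theorem optimize_hashtags_py_spec : Claim_equal_optimize_hashtags_py := by
  intro hashtags limit optimal _
  unfold Spec_optimize_hashtags_py optimize_hashtags_py optimize_hashtags_py_alt
  by_cases h : hashtags = []
  · simp [h]
  · rw [if_neg h, if_neg h]
    dsimp only
    have hinit : (([] : List String), (PySem.Set.empty : PySem.Set String))
        = ((PySem.Dict.empty : PySem.Dict String String).values, (PySem.Dict.empty : PySem.Dict String String).keys) := rfl
    rw [hinit, dedup_agree hashtags PySem.Dict.empty rfl, partition_filters]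
    simp only [List.nil_append]
    rw [sort_eq_gather _ (values_nodup hashtags PySem.Dict.empty rfl (by simp [PySem.Dict.keys, PySem.Dict.empty]))]
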